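-- pv_equiv track=rewrite | github.com/parasiitism/AlgoDaily | geeksforgeeks/find-all-pairs-whose-sum-is-x/main.py | f
-- ===== SOURCE A (Python) =====
-- def f(A, B, target):
--     res = []
--     hs = set(A)
--     for x in B:
--         remain = target - x
--         if remain in hs:
--             res.append([remain, x])
--     return sorted(res)
-- ===== SOURCE B (Python) =====
-- def f(A, B, target):
--     cnt = {}
--     for x in B:
--         cnt[x] = cnt.get(x, 0) + 1
--     return [[a, target - a] for a in sorted(set(A)) for _ in range(cnt.get(target - a, 0))]
-- ===== Notes on version B (the rewrite author's own statement) =====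
-- stated objective: alternative
-- what changed: A scans B testing membership in set(A) and sorts the collected pairs afterwards; B builds a count dictionary of B once and walks sorted(set(A)), emitting each pair with its multiplicity so the output is produced already in sorted order with no final sort.
import Mathlib
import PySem

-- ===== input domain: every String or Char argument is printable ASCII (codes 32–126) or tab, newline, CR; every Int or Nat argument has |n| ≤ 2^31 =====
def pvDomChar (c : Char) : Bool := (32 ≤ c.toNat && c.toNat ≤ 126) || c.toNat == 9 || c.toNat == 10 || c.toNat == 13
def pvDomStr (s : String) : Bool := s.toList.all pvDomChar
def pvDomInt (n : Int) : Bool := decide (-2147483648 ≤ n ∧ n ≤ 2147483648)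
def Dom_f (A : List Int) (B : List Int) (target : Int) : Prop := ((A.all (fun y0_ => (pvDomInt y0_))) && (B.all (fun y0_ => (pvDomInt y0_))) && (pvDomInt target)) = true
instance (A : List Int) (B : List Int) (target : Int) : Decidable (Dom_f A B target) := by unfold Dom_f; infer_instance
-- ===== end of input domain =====

-- B replaces A's scan-B-then-sort with a counter of B consumed along sorted(set(A)), emitting the
-- output already in order (objective: alternative decomposition, same asymptotic cost).

-- ===== PORT A =====
def f (A : List Int) (B : List Int) (target : Int) : List (List Int) :=
  let hs := PySem.Set.ofList A
  let res : List (List Int) := B.foldl (fun res x =>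
    let remain := target - x
    if remain ∈ hs then res ++ [[remain, x]] else res) []
  PySem.List.sorted res (fun r => r) false

-- ===== PORT B =====
def f_alt (A : List Int) (B : List Int) (target : Int) : List (List Int) :=
  let cnt := B.foldl (fun d x => d.insert x (d.getD x 0 + 1)) (PySem.Dict.empty : PySem.Dict Int Int)
  (PySem.List.sorted (PySem.Set.ofList A) (fun a => a) false).flatMap
    (fun a => List.replicate (cnt.getD (target - a) 0).toNat [a, target - a])

-- ===== PRECONDITION & SPEC =====
def Spec_f (A : List Int) (B : List Int) (target : Int) (out : List (List Int)) : Prop := out = f_alt A B target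
instance (A : List Int) (B : List Int) (target : Int) (out : List (List Int)) : Decidable (Spec_f A B target out) := by unfold Spec_f; infer_instance

-- ===== CLAIM (what is proved, stated in full; the proofs are below) =====
def Claim_equal_f : Prop := ∀ (A : List Int) (B : List Int) (target : Int), Dom_f A B target → Spec_f A B target (f A B target)

-- ===== LEMMAS AND PROOFS =====

-- A's accumulation loop is filter-then-map.
theorem f_res_eq (A B : List Int) (target : Int) (acc : List (List Int)) :
    B.foldl (fun res x =>
      if (target - x) ∈ PySem.Set.ofList A then res ++ [[target - x, x]] else res) acc
    = acc ++ (B.filter (fun x => decide ((target - x) ∈ A))).map (fun x => [target - x, x]) := by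
  induction B generalizing acc with
  | nil => simp
  | cons x B ih =>
    simp only [List.foldl_cons, List.filter_cons]
    by_cases h : (target - x) ∈ A
    · rw [if_pos ((PySem.Set.mem_ofList A _).mpr h), ih]
      simp [h]
    · rw [if_neg (fun hc => h ((PySem.Set.mem_ofList A _).mp hc)), ih]
      simp [h]

-- B's output, with the counter and range loops evaluated.
theorem f_alt_eq (A B : List Int) (target : Int) :
    f_alt A B target
    = (PySem.List.sorted (PySem.Set.ofList A) (fun a => a) false).flatMap
        (fun a => List.replicate (B.count (target - a)) [a, target - a]) := by
  unfold f_alt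
  simp only [PySem.Dict.getD_foldl_insert_add_one, PySem.Dict.getD_empty, zero_add,
    Int.toNat_natCast]

-- multiset equality of B's output with A's unsorted list
theorem perm_key (A B : List Int) (target : Int) :
    ((PySem.List.sorted (PySem.Set.ofList A) (fun a => a) false).flatMap
        (fun a => List.replicate (B.count (target - a)) [a, target - a])).Perm
      ((B.filter (fun x => decide ((target - x) ∈ A))).map (fun x => [target - x, x])) := by
  rw [List.perm_iff_count]
  intro p
  have hg : Function.Injective (fun x : Int => [target - x, x]) := by
    intro a b h
    have h' : target - a = target - b ∧ a = b := by simpa using h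
    exact h'.2
  have hmemS : ∀ a : Int,
      a ∈ PySem.List.sorted (PySem.Set.ofList A) (fun a => a) false ↔ a ∈ A := by
    intro a; rw [PySem.List.mem_sorted, PySem.Set.mem_ofList]
  have hnd : (PySem.List.sorted (PySem.Set.ofList A) (fun a => a) false).Nodup := by
    exact (PySem.List.sorted_ofList_pairwise_lt A).imp (fun h => ne_of_lt h)
  rw [List.count_flatMap]
  by_cases hp : ∃ v : Int, p = [target - v, v]
  · obtain ⟨v, rfl⟩ := hp
    have hright : List.count [target - v, v]
        ((B.filter (fun x => decide ((target - x) ∈ A))).map (fun x => [target - x, x]))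
        = if (target - v) ∈ A then B.count v else 0 := by
      rw [List.count_map_of_injective _ _ hg v]
      by_cases hv : (target - v) ∈ A
      · rw [if_pos hv, List.count_filter (by simpa using hv)]
      · rw [if_neg hv, List.count_eq_zero_of_not_mem]
        simp [hv]
    rw [hright]
    have hterm : ∀ a : Int,
        (List.count [target - v, v] ∘ fun a => List.replicate (B.count (target - a)) [a, target - a]) a
        = if a = target - v then B.count v else 0 := by
      intro a
      simp only [Function.comp, List.count_replicate]
      by_cases ha : a = target - v
      · subst ha
        have : target - (target - v) = v := by ring
        simp [this]
      · have : ¬ (([a, target - a] : List Int) == [target - v, v]) = true := by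
          simp; intro h1 _; exact absurd h1 ha
        simp [this, ha]
    rw [List.map_congr_left (fun a _ => hterm a)]
    by_cases hv : (target - v) ∈ A
    · rw [if_pos hv]
      have hmem : (target - v) ∈ PySem.List.sorted (PySem.Set.ofList A) (fun a => a) false :=
        (hmemS _).mpr hv
      -- sum of an indicator over a nodup list containing the hit
      obtain ⟨l1, l2, hsplit⟩ := List.append_of_mem hmem
      rw [hsplit] at hnd ⊢
      have hnd' := hnd
      rw [List.nodup_append] at hnd'
      have h1 : ∀ a ∈ l1, a ≠ target - v := fun a ha =>
        hnd'.2.2 a ha (target - v) (List.mem_cons_self ..)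
      have h2 : ∀ a ∈ l2, a ≠ target - v := fun a ha h => by
        subst h; exact (List.nodup_cons.mp hnd'.2.1).1 ha
      rw [List.map_append, List.sum_append, List.map_cons, List.sum_cons]
      have e1 : (l1.map fun a => if a = target - v then B.count v else 0).sum = 0 := by
        rw [List.sum_eq_zero]; intro x hx
        simp only [List.mem_map] at hx
        obtain ⟨a, ha, rfl⟩ := hx
        rw [if_neg (h1 a ha)]
      have e2 : (l2.map fun a => if a = target - v then B.count v else 0).sum = 0 := by
        rw [List.sum_eq_zero]; intro x hx
        simp only [List.mem_map] at hx
        obtain ⟨a, ha, rfl⟩ := hx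
        rw [if_neg (h2 a ha)]
      simp [e1, e2]
    · rw [if_neg hv]
      rw [List.sum_eq_zero]
      intro x hx
      simp only [List.mem_map] at hx
      obtain ⟨a, ha, rfl⟩ := hx
      have : a ≠ target - v := by
        intro h; subst h; exact hv ((hmemS _).mp ha)
      rw [if_neg this]
  · -- p is not a pair [target - v, v]: both counts are 0
    have hright : List.count p
        ((B.filter (fun x => decide ((target - x) ∈ A))).map (fun x => [target - x, x])) = 0 := by
      rw [List.count_eq_zero_of_not_mem]
      intro hmem
      obtain ⟨x, _, hx⟩ := List.mem_map.mp hmem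
      exact hp ⟨x, hx.symm⟩
    rw [hright, List.sum_eq_zero]
    intro x hx
    simp only [List.mem_map, Function.comp] at hx
    obtain ⟨a, _, rfl⟩ := hx
    rw [List.count_replicate, if_neg]
    simp only [beq_iff_eq]
    intro h
    exact hp ⟨target - a, by rw [← h]; congr 1; ring⟩

-- B's output is nondecreasing in Python's list order
theorem pairwise_key (A B : List Int) (target : Int) :
    ((PySem.List.sorted (PySem.Set.ofList A) (fun a => a) false).flatMap
        (fun a => List.replicate (B.count (target - a)) [a, target - a])).Pairwise
      (fun x1 x2 => x1 ≤ x2) := by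
  have hS := PySem.List.sorted_ofList_pairwise_lt A
  generalize PySem.List.sorted (PySem.Set.ofList A) (fun a => a) false = S at hS
  induction S with
  | nil => simp
  | cons a S ih =>
    rw [List.pairwise_cons] at hS
    simp only [List.flatMap_cons]
    rw [List.pairwise_append]
    refine ⟨?_, ih hS.2, ?_⟩
    · exact List.pairwise_replicate.mpr (Or.inr (le_refl _))
    · intro x hx y hy
      rw [List.eq_of_mem_replicate hx]
      obtain ⟨b, hb, hyb⟩ := List.mem_flatMap.mp hy
      rw [List.eq_of_mem_replicate hyb]
      exact le_of_lt (List.Lex.rel (hS.1 b hb))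

-- the default LT instance on List Int (used where A's port elaborates `sorted`) and the
-- Mathlib LinearOrder one (used by the order lemmas) define the same order
theorem sorted_ext {κ : Type} {lt1 lt2 : LT κ} {d1 : @DecidableLT κ lt1} {d2 : @DecidableLT κ lt2}
    (h : ∀ a b : κ, @LT.lt κ lt1 a b ↔ @LT.lt κ lt2 a b) (xs : List κ) :
    @PySem.List.sorted κ κ lt1 d1 xs (fun x => x) false = @PySem.List.sorted κ κ lt2 d2 xs (fun x => x) false := by
  rw [@PySem.List.sorted_eq_foldl_insertBy κ κ lt1 d1 xs (fun x => x),
      @PySem.List.sorted_eq_foldl_insertBy κ κ lt2 d2 xs (fun x => x)]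
  congr 1
  funext acc x
  congr 1
  funext a b
  exact decide_eq_decide.mpr (h a b)

theorem sorted_bridge (xs ys : List (List Int)) (hperm : ys.Perm xs)
    (hpw : ys.Pairwise (fun x1 x2 : List Int => x1 ≤ x2)) :
    PySem.List.sorted xs (fun r => r) false = ys := by
  have h2 := PySem.List.sorted_id_eq_of_perm_of_pairwise xs ys hperm hpw
  rw [← h2]
  exact sorted_ext (fun a b => List.lt_iff_lex_lt a b) xs

-- ===== VERDICT (by name: the statement is the Claim_ definition above) =====
theorem f_spec : Claim_equal_f := by
  intro A B target _
  unfold Spec_f f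
  rw [f_alt_eq]
  simp only []
  rw [f_res_eq, List.nil_append]
  exact sorted_bridge _ _ (perm_key A B target) (pairwise_key A B target)
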